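-- pv_equiv track=rewrite | github.com/drinkgalaxy/coding-practice | 프로그래머스/0/181931. 등차수열의 특정한 항만 더하기/등차수열의 특정한 항만 더하기.py | solution
-- ===== SOURCE A (Python) =====
-- def solution(a, d, included):
--     plus = a
--     answer = 0
--     for i in range(len(included)):
--         if included[i]:
--             answer += plus
--         plus += d
--     return answer
-- ===== SOURCE B (Python) =====
-- def solution(a, d, included):
--     k = included.count(True)
--     s = sum(i for i, inc in enumerate(included) if inc)
--     return k * a + s * d
-- ===== Notes on version B (the rewrite author's own statement) =====
-- stated objective: alternative
-- what changed: B never forms or adds individual sequence terms: it computes two aggregates (k = number of selected flags, s = sum of selected indices) in staged passes and returns the algebraic closed form k*a + s*d, instead of A's single loop threading a running term 'plus' and adding it term by term.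
import Mathlib
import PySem

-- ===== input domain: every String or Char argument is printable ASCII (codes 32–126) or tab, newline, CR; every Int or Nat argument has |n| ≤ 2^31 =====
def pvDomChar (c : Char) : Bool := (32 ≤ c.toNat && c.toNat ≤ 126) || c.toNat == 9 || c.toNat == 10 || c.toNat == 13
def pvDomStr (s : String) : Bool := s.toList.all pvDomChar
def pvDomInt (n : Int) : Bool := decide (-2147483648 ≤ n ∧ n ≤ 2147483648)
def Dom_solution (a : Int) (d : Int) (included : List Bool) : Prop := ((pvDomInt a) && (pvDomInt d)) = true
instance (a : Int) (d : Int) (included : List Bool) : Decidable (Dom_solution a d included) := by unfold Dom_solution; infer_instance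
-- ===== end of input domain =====

-- B never adds individual terms: it computes k = count of selected flags and s = sum of selected
-- indices in staged passes and returns the algebraic closed form k*a + s*d; same outputs.

-- ===== PORT A =====
-- loop over range(len(included)); included[i] is always in range, so pyGetD with a dummy default is exact here
def solution (a : Int) (d : Int) (included : List Bool) : Int :=
  let st := (PySem.List.pyRange 0 (PySem.List.len included) 1).foldl
    (fun (st : Int × Int) i =>
      let answer := if PySem.List.pyGetD included i false then st.2 + st.1 else st.2
      (st.1 + d, answer)) (a, 0)
  st.2

-- ===== PORT B =====
def solution_alt (a : Int) (d : Int) (included : List Bool) : Int :=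
  let k : Int := (PySem.List.count included true : Int)
  let s : Int := (((PySem.List.enumerate included 0).filter (fun p => p.2)).map (fun p => p.1)).sum
  k * a + s * d

-- ===== PRECONDITION & SPEC =====
def Spec_solution (a : Int) (d : Int) (included : List Bool) (out : Int) : Prop := out = solution_alt a d included
instance (a : Int) (d : Int) (included : List Bool) (out : Int) : Decidable (Spec_solution a d included out) := by unfold Spec_solution; infer_instance

-- ===== CLAIM =====
def Claim_equal_solution : Prop := ∀ (a : Int) (d : Int) (included : List Bool), Dom_solution a d included → Spec_solution a d included (solution a d included)

-- ===== LEMMAS AND PROOFS =====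

theorem solution_loop_key (a d : Int) : ∀ (t : List Bool) (s0 ans : Int),
    (t.foldl (fun (st : Int × Int) b => (st.1 + d, if b then st.2 + st.1 else st.2)) (a + s0 * d, ans)).2
      = ans + (t.count true : Int) * a
          + (((PySem.List.enumerate t s0).filter (fun p => p.2)).map (fun p => p.1)).sum * d := by
  intro t
  induction t with
  | nil => intro s0 ans; simp [PySem.List.enumerate_nil]
  | cons b t ih =>
    intro s0 ans
    have h1 : a + s0 * d + d = a + (s0 + 1) * d := by ring
    simp only [List.foldl_cons, PySem.List.enumerate_cons, List.filter_cons, List.count_cons]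
    cases b with
    | false =>
      simp only [if_false, Bool.false_eq_true, beq_iff_eq]
      rw [h1, ih (s0 + 1) ans]
      simp
    | true =>
      simp only [if_true, List.map_cons, List.sum_cons, beq_self_eq_true]
      rw [h1, ih (s0 + 1) (ans + (a + s0 * d))]
      push_cast
      ring

-- ===== VERDICT =====
theorem solution_spec : Claim_equal_solution := by
  intro a d included _
  unfold Spec_solution solution solution_alt
  rw [PySem.List.foldl_pyRange_zero_pyGetD included false
    (fun (st : Int × Int) b => (st.1 + d, if b then st.2 + st.1 else st.2)) (a, 0)]
  have := solution_loop_key a d included 0 0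
  simp only [zero_mul, add_zero, zero_add] at this
  rw [this]
  simp [PySem.List.count_eq]
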